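-- pv_equiv track=rewrite | github.com/scattered-ttit/1 | лаба 2.5.2.py | process_array
-- ===== SOURCE A (Python) =====
-- def process_array(arr):
--     positive_sum = sum(x for x in arr if x > 0)
--     min_index = arr.index(min(arr))
--     max_index = arr.index(max(arr))
--
--     if min_index > max_index:
--         min_index, max_index = max_index, min_index
--
--     product_between = 1
--     for x in arr[min_index + 1:max_index]:
--         product_between *= x
--
--     return positive_sum, product_between
-- ===== SOURCE B (Python) =====
-- def process_array(arr):
--     if not arr:
--         raise ValueError("min() arg is an empty sequence")
--     positive_sum = 0
--     min_val = max_val = arr[0]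
--     min_index = max_index = 0
--     for i, x in enumerate(arr):
--         if x > 0:
--             positive_sum += x
--         if x < min_val:
--             min_val, min_index = x, i
--         if x > max_val:
--             max_val, max_index = x, i
--     lo, hi = (min_index, max_index) if min_index < max_index else (max_index, min_index)
--     product_between = 1
--     for x in arr[lo + 1:hi]:
--         product_between *= x
--     return positive_sum, product_between
-- ===== Notes on version B (the rewrite author's own statement) =====
-- stated objective: alternative
-- what changed: A makes four separate library scans (sum, min, max, two .index searches) plus the product loop; B computes the positive sum and the min/max values with their first indices in one explicit enumerate pass, then runs the same product loop.
import Mathlib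
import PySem

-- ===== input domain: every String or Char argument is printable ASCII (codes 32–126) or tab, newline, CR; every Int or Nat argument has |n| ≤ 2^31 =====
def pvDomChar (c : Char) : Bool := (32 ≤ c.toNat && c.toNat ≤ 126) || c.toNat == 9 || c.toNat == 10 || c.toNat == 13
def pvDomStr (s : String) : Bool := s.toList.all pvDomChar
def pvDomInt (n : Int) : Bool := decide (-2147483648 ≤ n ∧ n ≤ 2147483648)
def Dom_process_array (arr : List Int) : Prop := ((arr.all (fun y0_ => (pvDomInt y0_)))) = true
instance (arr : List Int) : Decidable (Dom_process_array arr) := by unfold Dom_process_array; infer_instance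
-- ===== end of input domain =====

-- B fuses A's four library scans (sum / min / max / .index) into one explicit pass over enumerate(arr)
-- tracking the running min/max values with their first indices (alternative single-pass decomposition).

-- ===== PORT A =====
def process_array (arr : List Int) : Int × Int :=
  let positive_sum := arr.foldl (fun s x => if x > 0 then s + x else s) 0
  let min_index : Int := match PySem.List.min? arr (fun x => x) with
    | none => 0
    | some m => ((PySem.List.index? arr m).getD 0 : Nat)
  let max_index : Int := match PySem.List.max? arr (fun x => x) with
    | none => 0
    | some m => ((PySem.List.index? arr m).getD 0 : Nat)
  -- conditional swap 'min_index, max_index = max_index, min_index'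
  let lo := if min_index > max_index then max_index else min_index
  let hi := if min_index > max_index then min_index else max_index
  let product_between := (PySem.List.slice arr (some (lo + 1)) (some hi)).foldl (fun p x => p * x) 1
  (positive_sum, product_between)

-- ===== PORT B =====
def process_array_alt (arr : List Int) : Int × Int :=
  match arr with
  | [] => (0, 1)   -- unreachable under Pre_ (the Python raises ValueError on an empty list)
  | a :: _ =>
    let st := (PySem.List.enumerate arr 0).foldl
      (fun s p =>
        (if p.2 > 0 then s.1 + p.2 else s.1,
         (if p.2 < s.2.1.1 then (p.2, p.1) else s.2.1,
          if p.2 > s.2.2.1 then (p.2, p.1) else s.2.2)))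
      (0, (a, 0), (a, 0))
    let mini := st.2.1.2
    let maxi := st.2.2.2
    let lo := if mini < maxi then mini else maxi
    let hi := if mini < maxi then maxi else mini
    (st.1, (PySem.List.slice arr (some (lo + 1)) (some hi)).foldl (fun p x => p * x) 1)

-- ===== PRECONDITION & SPEC =====
-- Pre_ excludes exactly the empty list, on which Python's min([]) raises ValueError (both A and B raise there).
def Pre_process_array (arr : List Int) : Prop := arr ≠ []
instance (arr : List Int) : Decidable (Pre_process_array arr) := by unfold Pre_process_array; infer_instance
def pvWitness_process_array : List Int := ([1, -2, 3])

def Spec_process_array (arr : List Int) (out : Int × Int) : Prop := out = process_array_alt arr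
instance (arr : List Int) (out : Int × Int) : Decidable (Spec_process_array arr out) := by unfold Spec_process_array; infer_instance

-- ===== CLAIM (what is proved, stated in full; the proofs are below) =====
def Claim_equal_process_array : Prop := ∀ (arr : List Int), Dom_process_array arr → Pre_process_array arr → Spec_process_array arr (process_array arr)

-- ===== LEMMAS AND PROOFS =====

-- first-occurrence index?: on a member, .index equals idxOf
theorem index?_of_mem (m : Int) (l : List Int) (h : m ∈ l) :
    PySem.List.index? l m = some (List.idxOf m l) := by
  rw [PySem.List.index?_eq_idxOf?]
  induction l with
  | nil => simp at h
  | cons x t ih =>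
    by_cases hx : x = m
    · subst hx; simp [List.idxOf?_cons, List.idxOf_cons_self]
    · rw [List.idxOf_cons_ne _ (by exact hx), List.idxOf?_cons]
      simp only [beq_iff_eq, hx, if_false]
      rw [ih ((List.mem_cons.mp h).resolve_left (fun h1 => hx h1.symm))]
      rfl

-- B's running-min loop over `enumerate u s` started at (v, i): it ends at the overall minimum and
-- (when that minimum improves on v) at `s +` the first index of the minimum in u.
theorem minLoop (u : List Int) (s v i : Int) :
    (PySem.List.enumerate u s).foldl (fun q p => if p.2 < q.1 then (p.2, p.1) else q) (v, i)
      = (if u.foldl min v < v then (u.foldl min v, s + (List.idxOf (u.foldl min v) u : Nat)) else (v, i)) := by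
  induction u generalizing s v i with
  | nil => simp [PySem.List.enumerate_nil]
  | cons x t ih =>
    rw [PySem.List.enumerate_cons, List.foldl_cons]
    by_cases hx : x < v
    · simp only [hx, if_pos]
      rw [ih]
      have hmx : t.foldl min x ≤ x := (PySem.List.foldl_min_le t x).1
      have hmv : min v x = x := by omega
      by_cases hm : t.foldl min x < x
      · have hne : x ≠ t.foldl min x := by omega
        rw [List.foldl_cons, hmv, if_pos hm, if_pos (by omega : t.foldl min x < v),
          List.idxOf_cons_ne _ hne, Prod.mk.injEq]
        refine ⟨rfl, ?_⟩
        push_cast; ring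
      · have hx2 : t.foldl min x = x := by omega
        simp [hmv, hx2, hx, List.idxOf_cons_self]
    · simp only [hx, ite_false]
      rw [ih, List.foldl_cons]
      have hmv : min v x = v := by omega
      by_cases hm : t.foldl min v < v
      · have hne : x ≠ t.foldl min v := by omega
        rw [hmv, if_pos hm, if_pos hm, List.idxOf_cons_ne _ hne, Prod.mk.injEq]
        refine ⟨rfl, ?_⟩
        push_cast; ring
      · simp [hmv, hm]

-- the mirror fact for B's running-max loop
theorem maxLoop (u : List Int) (s v i : Int) :
    (PySem.List.enumerate u s).foldl (fun q p => if p.2 > q.1 then (p.2, p.1) else q) (v, i)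
      = (if v < u.foldl max v then (u.foldl max v, s + (List.idxOf (u.foldl max v) u : Nat)) else (v, i)) := by
  induction u generalizing s v i with
  | nil => simp [PySem.List.enumerate_nil]
  | cons x t ih =>
    rw [PySem.List.enumerate_cons, List.foldl_cons]
    by_cases hx : x > v
    · simp only [hx, if_pos]
      rw [ih]
      have hmx : x ≤ t.foldl max x := (PySem.List.le_foldl_max t x).1
      have hmv : max v x = x := by omega
      by_cases hm : x < t.foldl max x
      · have hne : x ≠ t.foldl max x := by omega
        rw [List.foldl_cons, hmv, if_pos hm, if_pos (by omega : v < t.foldl max x),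
          List.idxOf_cons_ne _ hne, Prod.mk.injEq]
        refine ⟨rfl, ?_⟩
        push_cast; ring
      · have hx2 : t.foldl max x = x := by omega
        simp [hmv, hx2, hx, List.idxOf_cons_self]
    · simp only [hx, ite_false]
      rw [ih, List.foldl_cons]
      have hmv : max v x = v := by omega
      by_cases hm : v < t.foldl max v
      · have hne : x ≠ t.foldl max v := by omega
        rw [hmv, if_pos hm, if_pos hm, List.idxOf_cons_ne _ hne, Prod.mk.injEq]
        refine ⟨rfl, ?_⟩
        push_cast; ring
      · simp [hmv, hm]

-- a fold over enumerate that only reads the element is a fold over the list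
theorem enumFoldSnd (u : List Int) (s : Int) (g : Int → Int → Int) (init : Int) :
    (PySem.List.enumerate u s).foldl (fun acc p => g acc p.2) init = u.foldl g init := by
  induction u generalizing s init with
  | nil => simp [PySem.List.enumerate_nil]
  | cons x t ih => rw [PySem.List.enumerate_cons, List.foldl_cons, List.foldl_cons, ih]

-- B's min pair over the whole list, started from the head
theorem minIdx (a : Int) (t : List Int) :
    (PySem.List.enumerate (a :: t) 0).foldl (fun q p => if p.2 < q.1 then (p.2, p.1) else q) (a, 0)
      = (t.foldl min a, ((List.idxOf (t.foldl min a) (a :: t) : Nat) : Int)) := by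
  rw [PySem.List.enumerate_cons, List.foldl_cons]
  simp only [ite_self]
  rw [minLoop]
  have hle : t.foldl min a ≤ a := (PySem.List.foldl_min_le t a).1
  by_cases hm : t.foldl min a < a
  · rw [if_pos hm, List.idxOf_cons_ne _ (by omega), Prod.mk.injEq]
    refine ⟨rfl, ?_⟩
    push_cast; ring
  · have he : t.foldl min a = a := by omega
    rw [if_neg hm, he, List.idxOf_cons_self]
    simp
theorem maxIdx (a : Int) (t : List Int) :
    (PySem.List.enumerate (a :: t) 0).foldl (fun q p => if p.2 > q.1 then (p.2, p.1) else q) (a, 0)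
      = (t.foldl max a, ((List.idxOf (t.foldl max a) (a :: t) : Nat) : Int)) := by
  rw [PySem.List.enumerate_cons, List.foldl_cons]
  simp only [ite_self]
  rw [maxLoop]
  have hle : a ≤ t.foldl max a := (PySem.List.le_foldl_max t a).1
  by_cases hm : a < t.foldl max a
  · rw [if_pos hm, List.idxOf_cons_ne _ (by omega), Prod.mk.injEq]
    refine ⟨rfl, ?_⟩
    push_cast; ring
  · have he : t.foldl max a = a := by omega
    rw [if_neg hm, he, List.idxOf_cons_self]
    simp

-- ===== VERDICT (by name: the statement is the Claim_ definition above) =====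
theorem process_array_spec : Claim_equal_process_array := by
  intro arr _ hpre
  unfold Spec_process_array
  cases arr with
  | nil => exact absurd rfl hpre
  | cons a t =>
    show process_array (a :: t) = process_array_alt (a :: t)
    simp only [process_array, process_array_alt]
    rw [PySem.List.foldl_prod_mk
      (f := fun (s : Int) (p : Int × Int) => if p.2 > 0 then s + p.2 else s)
      (g := fun (y : (Int × Int) × (Int × Int)) (p : Int × Int) =>
        (if p.2 < y.1.1 then (p.2, p.1) else y.1, if p.2 > y.2.1 then (p.2, p.1) else y.2))]
    rw [PySem.List.foldl_prod_mk
      (f := fun (y : Int × Int) (p : Int × Int) => if p.2 < y.1 then (p.2, p.1) else y)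
      (g := fun (y : Int × Int) (p : Int × Int) => if p.2 > y.1 then (p.2, p.1) else y)]
    dsimp only
    rw [enumFoldSnd _ _ (fun s x => if x > 0 then s + x else s) 0, minIdx, maxIdx,
      PySem.List.min?_id_cons, PySem.List.max?_id_cons]
    dsimp only
    have hmmem : t.foldl min a ∈ a :: t := by
      rcases PySem.List.foldl_min_mem t a with h | h
      · rw [h]; exact List.mem_cons_self
      · exact List.mem_cons_of_mem _ h
    have hMmem : t.foldl max a ∈ a :: t := by
      rcases PySem.List.foldl_max_mem t a with h | h
      · rw [h]; exact List.mem_cons_self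
      · exact List.mem_cons_of_mem _ h
    simp only [index?_of_mem _ _ hmmem, index?_of_mem _ _ hMmem, Option.getD_some]
    have hlo : (if ((List.idxOf (t.foldl min a) (a :: t) : Nat) : Int) > ((List.idxOf (t.foldl max a) (a :: t) : Nat) : Int)
          then ((List.idxOf (t.foldl max a) (a :: t) : Nat) : Int) else ((List.idxOf (t.foldl min a) (a :: t) : Nat) : Int))
        = (if ((List.idxOf (t.foldl min a) (a :: t) : Nat) : Int) < ((List.idxOf (t.foldl max a) (a :: t) : Nat) : Int)
          then ((List.idxOf (t.foldl min a) (a :: t) : Nat) : Int) else ((List.idxOf (t.foldl max a) (a :: t) : Nat) : Int)) := by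
      split_ifs <;> omega
    have hhi : (if ((List.idxOf (t.foldl min a) (a :: t) : Nat) : Int) > ((List.idxOf (t.foldl max a) (a :: t) : Nat) : Int)
          then ((List.idxOf (t.foldl min a) (a :: t) : Nat) : Int) else ((List.idxOf (t.foldl max a) (a :: t) : Nat) : Int))
        = (if ((List.idxOf (t.foldl min a) (a :: t) : Nat) : Int) < ((List.idxOf (t.foldl max a) (a :: t) : Nat) : Int)
          then ((List.idxOf (t.foldl max a) (a :: t) : Nat) : Int) else ((List.idxOf (t.foldl min a) (a :: t) : Nat) : Int)) := by
      split_ifs <;> omega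
    rw [hlo, hhi]
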